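-- pv_equiv track=rewrite | github.com/HazyefahKhan/Recall | test/test_complete_solution.py | encode_with_html_entities
-- ===== SOURCE A (Python) =====
-- def encode_with_html_entities(text):
--     """Encode text with HTML entities for critical characters"""
--     encoded = ""
--     for char in text:
--         if char == '/':
--             encoded += '&#47;'
--         elif char == '*':
--             encoded += '&#42;'
--         elif char == '<':
--             encoded += '&lt;'
--         elif char == '>':
--             encoded += '&gt;'
--         elif char == '&':
--             encoded += '&amp;'
--         else:
--             encoded += char
--     return encoded
-- ===== SOURCE B (Python) =====
-- def encode_with_html_entities(text):
--     """Encode text with HTML entities for critical characters"""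
--     # '&' must be replaced first so entities introduced below are not re-encoded
--     return (text.replace('&', '&amp;')
--                 .replace('/', '&#47;')
--                 .replace('*', '&#42;')
--                 .replace('<', '&lt;')
--                 .replace('>', '&gt;'))
-- ===== Notes on version B (the rewrite author's own statement) =====
-- stated objective: idiomatic
-- what changed: Replaced the per-character loop with an if/elif chain and string accumulation by a chain of whole-string str.replace calls ('&' first so injected entities are not double-encoded).
import Mathlib
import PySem

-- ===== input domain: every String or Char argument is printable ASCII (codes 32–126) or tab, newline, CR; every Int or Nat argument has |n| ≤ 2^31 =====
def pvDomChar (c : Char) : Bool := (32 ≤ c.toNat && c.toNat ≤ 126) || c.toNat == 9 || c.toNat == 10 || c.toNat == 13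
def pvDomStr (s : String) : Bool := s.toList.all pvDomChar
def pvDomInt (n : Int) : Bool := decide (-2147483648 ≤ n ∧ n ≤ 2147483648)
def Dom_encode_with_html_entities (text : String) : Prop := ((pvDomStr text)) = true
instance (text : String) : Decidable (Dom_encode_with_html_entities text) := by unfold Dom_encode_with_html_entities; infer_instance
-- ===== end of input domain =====

-- B replaces A's per-character loop/if-elif chain by a chain of whole-string str.replace calls ('&' first); idiomatic, same behaviour.


-- ===== PORT A =====
-- 'for char in text:' with the if/elif chain and 'encoded += …', in the source order
def encode_with_html_entities (text : String) : String :=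
  String.ofList (text.toList.foldl
    (fun encoded char =>
      if char = '/' then encoded ++ "&#47;".toList
      else if char = '*' then encoded ++ "&#42;".toList
      else if char = '<' then encoded ++ "&lt;".toList
      else if char = '>' then encoded ++ "&gt;".toList
      else if char = '&' then encoded ++ "&amp;".toList
      else encoded ++ [char]) [])

-- ===== PORT B =====
-- chain of whole-string str.replace calls, '&' first
def encode_with_html_entities_alt (text : String) : String :=
  PySem.Str.replace (PySem.Str.replace (PySem.Str.replace (PySem.Str.replace
    (PySem.Str.replace text "&" "&amp;") "/" "&#47;") "*" "&#42;") "<" "&lt;") ">" "&gt;"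

-- ===== PRECONDITION & SPEC =====
def Spec_encode_with_html_entities (text : String) (out : String) : Prop := out = encode_with_html_entities_alt text
instance (text : String) (out : String) : Decidable (Spec_encode_with_html_entities text out) := by unfold Spec_encode_with_html_entities; infer_instance

-- ===== CLAIM (what is proved, stated in full; the proofs are below) =====
def Claim_equal_encode_with_html_entities : Prop := ∀ (text : String), Dom_encode_with_html_entities text → Spec_encode_with_html_entities text (encode_with_html_entities text)

-- ===== LEMMAS AND PROOFS =====

-- A's per-character encoding, named for the proof
def pvEncA (c : Char) : List Char :=
  if c = '/' then "&#47;".toList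
  else if c = '*' then "&#42;".toList
  else if c = '<' then "&lt;".toList
  else if c = '>' then "&gt;".toList
  else if c = '&' then "&amp;".toList
  else [c]

-- replacing one character, as a per-character function
def pvRepl (o : Char) (new : List Char) (c : Char) : List Char := if c = o then new else [c]

-- replace.go with a single-character pattern is a per-character flatMap
lemma replace_go_single (o : Char) (new : List Char) :
    ∀ (l acc : List Char) (fuel : Nat), l.length ≤ fuel →
      PySem.Chars.replace.go [o] new fuel l acc
        = acc.reverse ++ l.flatMap (pvRepl o new) := by
  intro l
  induction l with
  | nil => intro acc fuel h; cases fuel <;> simp [PySem.Chars.replace.go]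
  | cons c t ih =>
    intro acc fuel h
    cases fuel with
    | zero => simp at h
    | succ n =>
      simp only [PySem.Chars.replace.go]
      by_cases hc : c = o
      · subst hc
        simp [List.isPrefixOf, pvRepl, ih _ _ (by simpa using Nat.le_of_succ_le_succ h)]
      · simp [List.isPrefixOf, hc, Ne.symm hc, pvRepl,
          ih _ _ (by simpa using Nat.le_of_succ_le_succ h)]

lemma replace_single (l : List Char) (o : Char) (new : List Char) :
    PySem.Chars.replace l [o] new = l.flatMap (pvRepl o new) := by
  simp [PySem.Chars.replace, replace_go_single o new l [] l.length le_rfl]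

-- composing the five single-character replacements, per character, gives A's encoding
lemma compose_eq_encA (c : Char) :
    (pvRepl '&' "&amp;".toList c).flatMap (fun x =>
      (pvRepl '/' "&#47;".toList x).flatMap (fun x =>
        (pvRepl '*' "&#42;".toList x).flatMap (fun x =>
          (pvRepl '<' "&lt;".toList x).flatMap (pvRepl '>' "&gt;".toList)))) = pvEncA c := by
  by_cases h1 : c = '&'; · subst h1; decide
  by_cases h2 : c = '/'; · subst h2; decide
  by_cases h3 : c = '*'; · subst h3; decide
  by_cases h4 : c = '<'; · subst h4; decide
  by_cases h5 : c = '>'; · subst h5; decide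
  simp [pvRepl, pvEncA, h1, h2, h3, h4, h5]

-- A's loop is the flatMap of pvEncA
lemma encA_foldl (l : List Char) :
    l.foldl
      (fun encoded char =>
        if char = '/' then encoded ++ "&#47;".toList
        else if char = '*' then encoded ++ "&#42;".toList
        else if char = '<' then encoded ++ "&lt;".toList
        else if char = '>' then encoded ++ "&gt;".toList
        else if char = '&' then encoded ++ "&amp;".toList
        else encoded ++ [char]) [] = l.flatMap pvEncA := by
  have hfun : (fun (encoded : List Char) (char : Char) =>
        if char = '/' then encoded ++ "&#47;".toList
        else if char = '*' then encoded ++ "&#42;".toList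
        else if char = '<' then encoded ++ "&lt;".toList
        else if char = '>' then encoded ++ "&gt;".toList
        else if char = '&' then encoded ++ "&amp;".toList
        else encoded ++ [char])
      = fun encoded char => encoded ++ pvEncA char := by
    funext encoded char
    simp only [pvEncA]
    split_ifs <;> rfl
  rw [hfun]
  simpa using PySem.List.foldl_append_eq_flatMap pvEncA l []

-- ===== VERDICT (by name: the statement is the Claim_ definition above) =====
theorem encode_with_html_entities_spec : Claim_equal_encode_with_html_entities := by
  intro text _
  unfold Spec_encode_with_html_entities encode_with_html_entities encode_with_html_entities_alt
  refine (String.toList_inj.mp ?_).symm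
  simp only [PySem.Str.toList_replace, String.toList_ofList,
    show "&".toList = ['&'] from rfl, show "/".toList = ['/'] from rfl,
    show "*".toList = ['*'] from rfl, show "<".toList = ['<'] from rfl,
    show ">".toList = ['>'] from rfl,
    replace_single, List.flatMap_assoc, encA_foldl]
  exact List.flatMap_congr fun c _ => compose_eq_encA c
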